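-- pv_equiv track=rewrite | github.com/ivanmostoles/CD-Generator-v1.1 | SNGen_Alpha.py | generate_distinct_numbers_with_constraints
-- ===== SOURCE A (Python) =====
-- def generate_distinct_numbers_with_constraints(total_sum, max_gap=5):
--     if total_sum < 3:
--         raise ValueError("The total sum must be at least 3 to generate three distinct numbers.")
--
--      # Start with the smallest possible base values
--     base = total_sum // 3
--     remainder = total_sum % 3
--
--     # Distribute the remainder to make the numbers distinct
--     numbers = [base, base + 1, base + 2] if remainder == 2 else [base, base, base + 1]
--
--     # Adjust numbers to satisfy the max_gap constraint
--     while numbers[2] - numbers[0] > max_gap: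
--         numbers[2] -= 1
--         numbers[0] += 1
--
--     return tuple(numbers)
-- ===== SOURCE B (Python) =====
-- def generate_distinct_numbers_with_constraints(total_sum, max_gap=5):
--     if total_sum < 3:
--         raise ValueError("The total sum must be at least 3 to generate three distinct numbers.")
--     base, remainder = divmod(total_sum, 3)
--     if remainder == 2:
--         lo, mid, hi = base, base + 1, base + 2
--     else:
--         lo, mid, hi = base, base, base + 1
--     # close the gap arithmetically instead of looping: each loop step shrinks
--     # the gap by 2, so the loop fires n = max(0, ceil((gap - max_gap)/2)) times
--     n = max(0, (hi - lo - max_gap + 1) // 2)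
--     return (lo + n, mid, hi - n)
-- ===== Notes on version B (the rewrite author's own statement) =====
-- stated objective: simpler
-- what changed: The iterative while-loop that shrinks the gap one step at a time is replaced by a closed-form count of its iterations (n = max(0, (gap - max_gap + 1)//2)) applied in one arithmetic step.
import Mathlib
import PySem

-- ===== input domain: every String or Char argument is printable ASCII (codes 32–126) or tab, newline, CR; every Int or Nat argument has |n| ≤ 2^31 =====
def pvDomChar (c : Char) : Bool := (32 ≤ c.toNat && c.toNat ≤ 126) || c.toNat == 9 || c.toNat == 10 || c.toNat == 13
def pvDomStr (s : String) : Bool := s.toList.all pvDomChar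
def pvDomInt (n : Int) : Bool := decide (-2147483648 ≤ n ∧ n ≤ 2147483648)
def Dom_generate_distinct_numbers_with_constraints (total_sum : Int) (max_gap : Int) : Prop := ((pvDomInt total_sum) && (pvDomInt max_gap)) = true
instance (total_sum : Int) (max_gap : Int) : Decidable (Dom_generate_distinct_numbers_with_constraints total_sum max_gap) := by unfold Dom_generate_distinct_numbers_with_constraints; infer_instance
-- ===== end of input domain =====

-- B replaces A's iterative gap-shrinking while-loop by a closed-form count of its iterations (objective: simpler).
-- Pre_ excludes total_sum < 3, where the Python A (and B) raise ValueError.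


-- ===== PORT A =====
-- the while loop: while hi - lo > max_gap: hi -= 1; lo += 1  (middle element untouched)
def pvLoopA (lo hi max_gap : Int) : Int × Int :=
  if hi - lo > max_gap then pvLoopA (lo + 1) (hi - 1) max_gap else (lo, hi)
termination_by (hi - lo - max_gap).toNat
decreasing_by omega

def generate_distinct_numbers_with_constraints (total_sum : Int) (max_gap : Int) : Int × Int × Int :=
  if total_sum < 3 then (0, 0, 0)  -- Python raises ValueError here; excluded by Pre_
  else
    let base := PySem.Int.floordiv total_sum 3
    let remainder := PySem.Int.mod total_sum 3
    let numbers : Int × Int × Int :=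
      if remainder = 2 then (base, base + 1, base + 2) else (base, base, base + 1)
    let p := pvLoopA numbers.1 numbers.2.2 max_gap
    (p.1, numbers.2.1, p.2)

-- ===== PORT B =====
def generate_distinct_numbers_with_constraints_alt (total_sum : Int) (max_gap : Int) : Int × Int × Int :=
  if total_sum < 3 then (0, 0, 0)  -- Python raises ValueError here; excluded by Pre_
  else
    let base := PySem.Int.floordiv total_sum 3
    let remainder := PySem.Int.mod total_sum 3
    let (lo, mid, hi) : Int × Int × Int :=
      if remainder = 2 then (base, base + 1, base + 2) else (base, base, base + 1)
    let n := max 0 (PySem.Int.floordiv (hi - lo - max_gap + 1) 2)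
    (lo + n, mid, hi - n)

-- ===== PRECONDITION & SPEC =====
-- total_sum < 3 makes Python A raise ValueError (B raises the same); nothing else is excluded
def Pre_generate_distinct_numbers_with_constraints (total_sum : Int) (max_gap : Int) : Prop := 3 ≤ total_sum
instance (total_sum : Int) (max_gap : Int) : Decidable (Pre_generate_distinct_numbers_with_constraints total_sum max_gap) := by unfold Pre_generate_distinct_numbers_with_constraints; infer_instance
def pvWitness_generate_distinct_numbers_with_constraints : Int × Int := (10, 1)

def Spec_generate_distinct_numbers_with_constraints (total_sum : Int) (max_gap : Int) (out : Int × Int × Int) : Prop := out = generate_distinct_numbers_with_constraints_alt total_sum max_gap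
instance (total_sum : Int) (max_gap : Int) (out : Int × Int × Int) : Decidable (Spec_generate_distinct_numbers_with_constraints total_sum max_gap out) := by unfold Spec_generate_distinct_numbers_with_constraints; infer_instance

-- ===== CLAIM (what is proved, stated in full; the proofs are below) =====
def Claim_equal_generate_distinct_numbers_with_constraints : Prop := ∀ (total_sum : Int) (max_gap : Int), Dom_generate_distinct_numbers_with_constraints total_sum max_gap → Pre_generate_distinct_numbers_with_constraints total_sum max_gap → Spec_generate_distinct_numbers_with_constraints total_sum max_gap (generate_distinct_numbers_with_constraints total_sum max_gap)

-- ===== LEMMAS AND PROOFS =====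
-- the loop's fixpoint equals the closed-form shift by n = max 0 ((hi-lo-max_gap+1) // 2)
theorem pvLoopA_closed (lo hi max_gap : Int) :
    pvLoopA lo hi max_gap =
      (lo + max 0 (PySem.Int.floordiv (hi - lo - max_gap + 1) 2),
       hi - max 0 (PySem.Int.floordiv (hi - lo - max_gap + 1) 2)) := by
  rw [pvLoopA]
  split_ifs with h
  · rw [pvLoopA_closed (lo + 1) (hi - 1) max_gap]
    rw [PySem.Int.floordiv_eq_ediv_of_pos (by omega), PySem.Int.floordiv_eq_ediv_of_pos (by omega)]
    simp only [Prod.mk.injEq]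
    omega
  · rw [PySem.Int.floordiv_eq_ediv_of_pos (by omega)]
    have : (hi - lo - max_gap + 1) / 2 ≤ 0 := by omega
    simp only [Prod.mk.injEq]
    omega
termination_by (hi - lo - max_gap).toNat
decreasing_by omega

-- ===== VERDICT (by name: the statement is the Claim_ definition above) =====
theorem generate_distinct_numbers_with_constraints_spec : Claim_equal_generate_distinct_numbers_with_constraints := by
  intro total_sum max_gap _ hpre
  unfold Spec_generate_distinct_numbers_with_constraints
  unfold generate_distinct_numbers_with_constraints generate_distinct_numbers_with_constraints_alt
  have h3 : ¬ total_sum < 3 := by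
    exact not_lt.mpr hpre
  simp only [h3, if_false]
  split_ifs <;> simp [pvLoopA_closed]
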